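-- pv_equiv track=rewrite | github.com/yanickxia/project-euler | 51-100/54_Poker_hands.py | is_one_pairs
-- ===== SOURCE A (Python) =====
-- def is_one_pairs(cards: list):
--     couter, current, max_counter = 0, cards[0], 0
--
--     for card in cards:
--         if card == current:
--             couter += 1
--         else:
--             current = card
--             if couter > max_counter:
--                 max_counter = couter
--             couter = 1
--     if max_counter > couter:
--         return max_counter == 2
--     else:
--         return couter == 2
-- ===== SOURCE B (Python) =====
-- def is_one_pairs(cards: list):
--     # max consecutive-run length == 2  <=>  some adjacent pair is equal
--     # and no three consecutive cards are equal
--     has_pair = any(a == b for a, b in zip(cards, cards[1:]))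
--     has_triple = any(a == b == c for a, b, c in zip(cards, cards[1:], cards[2:]))
--     return has_pair and not has_triple
-- ===== Notes on version B (the rewrite author's own statement) =====
-- stated objective: simpler
-- what changed: Replaces A's stateful run-length counter with max tracking by two direct adjacency tests: max consecutive-run length equals 2 iff some adjacent pair is equal and no three consecutive cards are equal.
import Mathlib
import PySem

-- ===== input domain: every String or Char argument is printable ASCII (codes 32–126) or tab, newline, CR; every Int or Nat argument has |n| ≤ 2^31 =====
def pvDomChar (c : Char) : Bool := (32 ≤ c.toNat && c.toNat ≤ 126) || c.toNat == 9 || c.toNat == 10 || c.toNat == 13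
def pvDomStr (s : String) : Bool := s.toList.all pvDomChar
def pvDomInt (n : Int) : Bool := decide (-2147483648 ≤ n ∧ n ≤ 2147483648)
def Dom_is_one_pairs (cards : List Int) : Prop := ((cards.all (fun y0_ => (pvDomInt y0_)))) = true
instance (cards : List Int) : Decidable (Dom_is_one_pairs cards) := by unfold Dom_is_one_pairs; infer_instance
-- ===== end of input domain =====

-- B replaces A's run-length counter/max machinery with two adjacency tests
-- (some adjacent equal pair, no equal triple): simpler, same O(n) cost.
-- A raises IndexError on the empty list (indexing the first element); Pre_ excludes it, B returns False there.


-- ===== PORT A =====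
-- loop state (couter, current, max_counter); indexing the first element raises IndexError on the empty list,
-- excluded by Pre_, here rendered (pyGet? …).getD 0.
def is_one_pairs_step (st : Int × Int × Int) (card : Int) : Int × Int × Int :=
  if card == st.2.1 then (st.1 + 1, st.2.1, st.2.2)
  else (1, card, if st.1 > st.2.2 then st.1 else st.2.2)

def is_one_pairs (cards : List Int) : Bool :=
  let st := cards.foldl is_one_pairs_step (0, (PySem.List.pyGet? cards 0).getD 0, 0)
  if st.2.2 > st.1 then st.2.2 == 2 else st.1 == 2

-- ===== PORT B =====
def is_one_pairs_alt (cards : List Int) : Bool :=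
  let has_pair := (List.zip cards cards.tail).any (fun p => p.1 == p.2)
  let has_triple := (List.zip cards (List.zip cards.tail cards.tail.tail)).any
    (fun t => t.1 == t.2.1 && t.2.1 == t.2.2)
  has_pair && !has_triple

-- ===== PRECONDITION & SPEC =====
-- A indexes the first element first, so it raises IndexError on the empty list; Pre_ excludes exactly that.
def Pre_is_one_pairs (cards : List Int) : Prop := cards ≠ []
instance (cards : List Int) : Decidable (Pre_is_one_pairs cards) := by unfold Pre_is_one_pairs; infer_instance
def pvWitness_is_one_pairs : List Int := ([3, 3, 7])

def Spec_is_one_pairs (cards : List Int) (out : Bool) : Prop := out = is_one_pairs_alt cards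
instance (cards : List Int) (out : Bool) : Decidable (Spec_is_one_pairs cards out) := by unfold Spec_is_one_pairs; infer_instance

-- ===== CLAIM (what is proved, stated in full; the proofs are below) =====
def Claim_equal_is_one_pairs : Prop := ∀ (cards : List Int), Dom_is_one_pairs cards → Pre_is_one_pairs cards → Spec_is_one_pairs cards (is_one_pairs cards)

-- ===== LEMMAS AND PROOFS =====

-- run lengths of consecutive equal values, with a pending run of cur of length c
def pvRuns (cur : Int) (c : Nat) : List Int → List Nat
  | [] => [c]
  | x :: xs => if x = cur then pvRuns cur (c + 1) xs else c :: pvRuns x 1 xs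

-- recursive forms of B's two adjacency tests
def pvAdj : List Int → Bool
  | x :: y :: t => (x == y) || pvAdj (y :: t)
  | _ => false

def pvTri : List Int → Bool
  | x :: y :: z :: t => (x == y && y == z) || pvTri (y :: z :: t)
  | _ => false

def pvHeadIs (l : List Int) (cur : Int) : Bool :=
  match l with
  | x :: _ => x == cur
  | [] => false

theorem pvAdj_eq (l : List Int) :
    (List.zip l l.tail).any (fun p => p.1 == p.2) = pvAdj l := by
  match l with
  | [] => rfl
  | [x] => rfl
  | x :: y :: t =>
    simp only [List.tail, List.zip, List.zipWith, List.any_cons, pvAdj]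
    rw [show (List.zipWith Prod.mk (y :: t) t).any (fun p => p.1 == p.2)
          = (List.zip (y :: t) (y :: t).tail).any (fun p => p.1 == p.2) from rfl,
        pvAdj_eq (y :: t)]

theorem pvTri_eq (l : List Int) :
    (List.zip l (List.zip l.tail l.tail.tail)).any (fun t => t.1 == t.2.1 && t.2.1 == t.2.2)
      = pvTri l := by
  match l with
  | [] => rfl
  | [x] => rfl
  | [x, y] => rfl
  | x :: y :: z :: t =>
    simp only [List.tail, List.zip, List.zipWith, List.any_cons, pvTri]
    rw [show (List.zipWith Prod.mk (y :: z :: t) (List.zipWith Prod.mk (z :: t) t)).any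
            (fun t => t.1 == t.2.1 && t.2.1 == t.2.2)
          = (List.zip (y :: z :: t) (List.zip (y :: z :: t).tail (y :: z :: t).tail.tail)).any
            (fun t => t.1 == t.2.1 && t.2.1 == t.2.2) from rfl,
        pvTri_eq (y :: z :: t)]

theorem pv_foldl_max_init (l : List Nat) (a b : Nat) :
    List.foldl max (max a b) l = max a (List.foldl max b l) := by
  induction l generalizing b with
  | nil => rfl
  | cons x xs ih =>
    simp only [List.foldl_cons]
    rw [show max (max a b) x = max a (max b x) by omega, ih]

theorem pv_foldl_max_cons (c : Nat) (L : List Nat) :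
    List.foldl max 0 (c :: L) = max c (List.foldl max 0 L) := by
  simp only [List.foldl_cons]
  rw [show max 0 c = max c 0 by omega, pv_foldl_max_init]

-- A's loop computes max m (max run length), with pending run (cur, c)
theorem pvA_char (l : List Int) (cur m : Int) (c : Nat) :
    (let st := l.foldl is_one_pairs_step ((c : Int), cur, m)
     if st.2.2 > st.1 then st.2.2 else st.1)
    = max m ((pvRuns cur c l).foldl max 0 : Nat) := by
  induction l generalizing cur m c with
  | nil =>
    simp only [List.foldl_nil, pvRuns, List.foldl_cons, List.foldl_nil]
    omega
  | cons x xs ih =>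
    simp only [List.foldl_cons, is_one_pairs_step, pvRuns]
    by_cases hx : x = cur
    · simp only [hx, beq_self_eq_true, if_true]
      have h := ih cur m (c + 1)
      push_cast at h ⊢
      exact h
    · simp only [beq_iff_eq, hx, if_false, pv_foldl_max_cons]
      have h := ih x (if (c : Int) > m then (c : Int) else m) 1
      simp only [show ((1 : Int)) = ((1 : Nat) : Int) by norm_num] at *
      rw [h]
      omega

theorem pvAdj_char (l : List Int) (cur : Int) (c : Nat) (hc : 1 ≤ c) :
    (2 ≤ c ∨ pvAdj (cur :: l) = true) ↔ 2 ≤ (pvRuns cur c l).foldl max 0 := by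
  induction l generalizing cur c with
  | nil =>
    simp only [pvRuns, List.foldl_cons, List.foldl_nil]
    simp only [show pvAdj [cur] = false from rfl, Bool.false_eq_true, or_false]
    omega
  | cons x xs ih =>
    simp only [pvRuns]
    by_cases hx : x = cur
    · subst hx
      rw [if_pos rfl]
      have hR : 2 ≤ (pvRuns x (c + 1) xs).foldl max 0 :=
        (ih x (c + 1) (by omega)).mp (Or.inl (by omega))
      constructor
      · intro _; exact hR
      · intro _; right; simp [pvAdj]
    · simp only [hx, if_false, pv_foldl_max_cons]
      have h2 := ih x 1 (by omega)
      simp only [show ¬(2 ≤ 1) by omega, false_or] at h2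
      have hcx : (cur == x) = false := beq_eq_false_iff_ne.mpr (fun h => hx h.symm)
      have ha : pvAdj (cur :: x :: xs) = pvAdj (x :: xs) := by
        simp [pvAdj, hcx]
      rw [ha, h2]
      omega

theorem pvTri_char (l : List Int) (cur : Int) (c : Nat) (hc : 1 ≤ c) :
    (3 ≤ c ∨ (2 ≤ c ∧ pvHeadIs l cur = true) ∨ pvTri (cur :: l) = true)
      ↔ 3 ≤ (pvRuns cur c l).foldl max 0 := by
  induction l generalizing cur c with
  | nil =>
    simp only [pvRuns, List.foldl_cons, List.foldl_nil]
    simp only [show pvTri [cur] = false from rfl, show pvHeadIs [] cur = false from rfl,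
      Bool.false_eq_true, and_false, or_false]
    omega
  | cons x xs ih =>
    simp only [pvRuns]
    by_cases hx : x = cur
    · subst hx
      rw [if_pos rfl, ← ih x (c + 1) (by omega)]
      have htri : pvTri (x :: x :: xs) = (pvHeadIs xs x || pvTri (x :: xs)) := by
        cases xs with
        | nil => rfl
        | cons y t =>
          simp only [pvTri, pvHeadIs, beq_self_eq_true, Bool.true_and]
          by_cases h : x = y
          · simp [h]
          · simp [beq_eq_false_iff_ne.mpr h, beq_eq_false_iff_ne.mpr (fun hh => h hh.symm)]
      have hh : pvHeadIs (x :: xs) x = true := by simp [pvHeadIs]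
      by_cases P : pvHeadIs xs x = true <;> by_cases T : pvTri (x :: xs) = true <;>
        simp [htri, hh, P, T] <;> omega
    · simp only [hx, if_false, pv_foldl_max_cons]
      have h2 := ih x 1 (by omega)
      simp only [show ¬(3 ≤ 1) by omega, show ¬(2 ≤ 1) by omega, false_and, false_or] at h2
      have hcx : (cur == x) = false := beq_eq_false_iff_ne.mpr (fun h => hx h.symm)
      have htri : pvTri (cur :: x :: xs) = pvTri (x :: xs) := by
        cases xs with
        | nil => rfl
        | cons y t => simp [pvTri, hcx]
      have hh : pvHeadIs (x :: xs) cur = false := by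
        simp only [pvHeadIs]; exact beq_eq_false_iff_ne.mpr hx
      rw [htri, h2]
      simp only [hh, Bool.false_eq_true, and_false, false_or]
      omega

theorem pv_if_beq (a b : Int) :
    (if a > b then a == 2 else b == 2) = ((if a > b then a else b) == (2 : Int)) := by
  split_ifs <;> rfl

-- ===== VERDICT (by name: the statement is the Claim_ definition above) =====
theorem is_one_pairs_spec : Claim_equal_is_one_pairs := by
  intro cards _ hpre
  unfold Spec_is_one_pairs is_one_pairs is_one_pairs_alt
  match cards with
  | [] => exact absurd rfl hpre
  | x :: l =>
    rw [pvAdj_eq, pvTri_eq, pv_if_beq]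
    have h0 : (PySem.List.pyGet? (x :: l) 0).getD 0 = x := by
      rw [PySem.List.pyGet?_zero_cons]; rfl
    rw [List.foldl_cons, h0]
    have hstep : is_one_pairs_step ((0 : Int), x, 0) x = (((1 : Nat) : Int), x, (0 : Int)) := by
      simp [is_one_pairs_step]
    rw [hstep, pvA_char l x 0 1]
    set M := (pvRuns x 1 l).foldl max 0 with hM
    have hadj := pvAdj_char l x 1 (by omega)
    have htri := pvTri_char l x 1 (by omega)
    simp only [show ¬(2 ≤ 1) by omega, show ¬(3 ≤ 1) by omega, false_and, false_or] at hadj htri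
    have hmax : max (0 : Int) (M : Nat) = ((M : Nat) : Int) := by omega
    rw [hmax]
    cases ha : pvAdj (x :: l) <;> cases ht : pvTri (x :: l) <;>
      simp only [ha, ht, Bool.false_eq_true, true_iff, false_iff, iff_true, iff_false] at hadj htri <;>
      rw [← hM] at hadj htri <;>
      simp only [Bool.not_true, Bool.not_false, Bool.and_true, Bool.and_false,
        Bool.true_and, Bool.false_and, beq_iff_eq, beq_eq_false_iff_ne] <;>
      omega
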